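-- pv_equiv track=rewrite | github.com/dorabijvoet/climate-question-answering | climateqa/engine/chains/with_iea_retriever.py | divide_into_parts
-- ===== SOURCE A (Python) =====
-- def divide_into_parts(target, parts):
--     # Base value for each part
--     base = target // parts
--     # Remainder to distribute
--     remainder = target % parts
--     # List to hold the result
--     result = []
--
--     for i in range(parts):
--         if i < remainder:
--             # These parts get base value + 1
--             result.append(base + 1)
--         else:
--             # The rest get the base value
--             result.append(base)
--
--     return result
-- ===== SOURCE B (Python) =====
-- def divide_into_parts(target, parts):
--     # Greedy online splitting: repeatedly hand out the ceiling of what is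
--     # still left divided by the number of parts still to fill.
--     result = []
--     remaining, left = target, parts
--     while left > 0:
--         share = -(-remaining // left)
--         result.append(share)
--         remaining -= share
--         left -= 1
--     return result
-- ===== Notes on version B (the rewrite author's own statement) =====
-- stated objective: alternative
-- what changed: Replaces the precomputed divmod plus per-index conditional with a greedy online split: repeatedly hand out ceil(remaining/parts_left) while shrinking the remaining total and part count, which provably yields the same fair partition.
import Mathlib
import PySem

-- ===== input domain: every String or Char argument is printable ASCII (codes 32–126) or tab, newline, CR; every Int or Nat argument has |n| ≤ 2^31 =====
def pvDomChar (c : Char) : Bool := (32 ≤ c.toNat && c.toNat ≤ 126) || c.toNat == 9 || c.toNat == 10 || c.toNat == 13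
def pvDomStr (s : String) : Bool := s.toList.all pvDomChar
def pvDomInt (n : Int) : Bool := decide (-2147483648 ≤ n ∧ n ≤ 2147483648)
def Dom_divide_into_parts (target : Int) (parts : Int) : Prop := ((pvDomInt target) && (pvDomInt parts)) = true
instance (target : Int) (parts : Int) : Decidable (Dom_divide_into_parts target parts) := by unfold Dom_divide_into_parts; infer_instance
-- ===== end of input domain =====

-- B replaces A's precomputed divmod + per-index conditional by a greedy online split
-- (repeatedly hand out ceil(remaining/parts_left)); objective: alternative algorithm, same cost.

-- ===== PORT A =====
def divide_into_parts (target : Int) (parts : Int) : List Int :=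
  let base := PySem.Int.floordiv target parts
  let remainder := PySem.Int.mod target parts
  (PySem.List.pyRange 0 parts 1).foldl
    (fun result i => result ++ [if i < remainder then base + 1 else base]) []

-- ===== PORT B =====
-- while left > 0: share = -(-remaining // left); append; remaining -= share; left -= 1
-- fuel = number of remaining iterations (= left.toNat, the while loop runs exactly that often)
def pvGreedyLoop : Nat → Int → Int → List Int → List Int
  | 0, _, _, result => result
  | n + 1, remaining, left, result =>
      let share := -(PySem.Int.floordiv (-remaining) left)
      pvGreedyLoop n (remaining - share) (left - 1) (result ++ [share])

def divide_into_parts_alt (target : Int) (parts : Int) : List Int :=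
  pvGreedyLoop parts.toNat target parts []

-- ===== PRECONDITION & SPEC =====
-- A raises ZeroDivisionError when parts = 0 (it divides by parts up front); those inputs are excluded.
def Pre_divide_into_parts (target : Int) (parts : Int) : Prop := parts ≠ 0
instance (target : Int) (parts : Int) : Decidable (Pre_divide_into_parts target parts) := by unfold Pre_divide_into_parts; infer_instance
def pvWitness_divide_into_parts : Int × Int := (7, 3)

def Spec_divide_into_parts (target : Int) (parts : Int) (out : List Int) : Prop := out = divide_into_parts_alt target parts
instance (target : Int) (parts : Int) (out : List Int) : Decidable (Spec_divide_into_parts target parts out) := by unfold Spec_divide_into_parts; infer_instance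

-- ===== CLAIM (what is proved, stated in full; the proofs are below) =====
def Claim_equal_divide_into_parts : Prop := ∀ (target : Int) (parts : Int), Dom_divide_into_parts target parts → Pre_divide_into_parts target parts → Spec_divide_into_parts target parts (divide_into_parts target parts)

-- ===== LEMMAS AND PROOFS =====

-- The common two-block value both programs compute (proof-side characterisation).
def pvBlocks (t p : Int) : List Int :=
  List.replicate (PySem.Int.mod t p).toNat (PySem.Int.floordiv t p + 1) ++
  List.replicate (p - PySem.Int.mod t p).toNat (PySem.Int.floordiv t p)

-- A equals the two-block value.
theorem A_eq_blocks (t p : Int) (hp : p ≠ 0) : divide_into_parts t p = pvBlocks t p := by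
  unfold divide_into_parts pvBlocks
  simp only []
  set base := PySem.Int.floordiv t p with hbase
  set r := PySem.Int.mod t p with hr
  rcases lt_or_gt_of_ne hp with hneg | hpos
  · have hb := PySem.Int.mod_neg_bounds t hneg
    rw [PySem.List.pyRange_one_eq_nil (by omega)]
    have h1 : r.toNat = 0 := by omega
    have h2 : (p - r).toNat = 0 := by omega
    simp [h1, h2]
  · have h0 : 0 ≤ r := PySem.Int.mod_nonneg t hpos
    have h1 : r < p := PySem.Int.mod_lt t hpos
    rw [PySem.List.foldl_append_singleton_eq_map, List.nil_append,
        PySem.List.pyRange_one_append 0 r p (by omega) (by omega),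
        List.map_append]
    congr 1
    · rw [List.map_congr_left (g := fun _ => base + 1)
        (fun i hi => by
          have := PySem.List.mem_pyRange_one.mp hi
          simp [if_pos this.2]),
        List.map_const', PySem.List.length_pyRange_one]
      simp
    · rw [List.map_congr_left (g := fun _ => base)
        (fun i hi => by
          have := PySem.List.mem_pyRange_one.mp hi
          simp [if_neg (not_lt.mpr this.1)]),
        List.map_const', PySem.List.length_pyRange_one]

-- B's greedy loop accumulates the two-block value (induction on the part count).
theorem greedy_eq_blocks : ∀ (n : Nat) (t p : Int) (acc : List Int), 0 < p → p.toNat = n →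
    pvGreedyLoop n t p acc = acc ++ pvBlocks t p := by
  intro n
  induction n with
  | zero => intro t p acc hp hn; omega
  | succ m ih =>
    intro t p acc hp hn
    rw [pvGreedyLoop]
    set base := PySem.Int.floordiv t p with hbase
    set r := PySem.Int.mod t p with hr
    have h0 : 0 ≤ r := PySem.Int.mod_nonneg t hp
    have h1 : r < p := PySem.Int.mod_lt t hp
    have ht : base * p + r = t := PySem.Int.floordiv_mul_add_mod t p
    by_cases hrz : r = 0
    · -- share = base
      have hq : -(PySem.Int.floordiv (-t) p) = base := by
        rw [PySem.Int.neg_floordiv_neg_eq_iff_of_pos hp]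
        constructor <;> nlinarith
      simp only [hq]
      by_cases hp1 : p = 1
      · subst hp1
        have hm : m = 0 := by omega
        subst hm
        rw [pvGreedyLoop]
        unfold pvBlocks
        rw [← hbase, ← hr, hrz]
        have hbt : base = t := by omega
        simp [hbt]
      · have hp' : 0 < p - 1 := by omega
        rw [ih (t - base) (p - 1) _ hp' (by omega)]
        have key : t - base = base * (p - 1) + 0 := by rw [← ht, hrz]; ring
        have hbase' : PySem.Int.floordiv (t - base) (p - 1) = base := by
          rw [PySem.Int.floordiv_eq_iff_of_pos hp']
          constructor <;> nlinarith
        have hr' : PySem.Int.mod (t - base) (p - 1) = 0 := by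
          have := PySem.Int.floordiv_mul_add_mod (t - base) (p - 1)
          rw [hbase'] at this
          nlinarith
        unfold pvBlocks
        rw [hbase', hr', ← hbase, ← hr, hrz]
        simp only [Int.toNat_zero, List.replicate_zero, List.nil_append, sub_zero,
          List.append_assoc, List.singleton_append]
        rw [show p.toNat = (p - 1).toNat + 1 by omega, List.replicate_succ]
    · -- share = base + 1
      have hq : -(PySem.Int.floordiv (-t) p) = base + 1 := by
        rw [PySem.Int.neg_floordiv_neg_eq_iff_of_pos hp]
        constructor
        · rw [show (base + 1 - 1) * p = base * p from by ring]
          have : 0 < r := lt_of_le_of_ne h0 (Ne.symm hrz)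
          linarith
        · rw [show (base + 1) * p = base * p + p from by ring]
          linarith
      simp only [hq]
      have hp' : 0 < p - 1 := by
        by_contra h
        have : p = 1 := by omega
        omega
      rw [ih (t - (base + 1)) (p - 1) _ hp' (by omega)]
      have key : t - (base + 1) = base * (p - 1) + (r - 1) := by rw [← ht]; ring
      have hbase' : PySem.Int.floordiv (t - (base + 1)) (p - 1) = base := by
        rw [PySem.Int.floordiv_eq_iff_of_pos hp']
        have hr1 : 0 < r := lt_of_le_of_ne h0 (Ne.symm hrz)
        constructor
        · rw [key]; linarith
        · rw [key, show (base + 1) * (p - 1) = base * (p - 1) + (p - 1) from by ring]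
          linarith
      have hr' : PySem.Int.mod (t - (base + 1)) (p - 1) = r - 1 := by
        have := PySem.Int.floordiv_mul_add_mod (t - (base + 1)) (p - 1)
        rw [hbase'] at this
        nlinarith
      unfold pvBlocks
      rw [hbase', hr', ← hbase, ← hr]
      rw [show (p - 1 - (r - 1)) = p - r by ring_nf,
          show r.toNat = (r - 1).toNat + 1 by omega, List.replicate_succ]
      simp

theorem alt_eq_blocks (t p : Int) (hp : p ≠ 0) : divide_into_parts_alt t p = pvBlocks t p := by
  unfold divide_into_parts_alt
  rcases lt_or_gt_of_ne hp with hneg | hpos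
  · rw [show p.toNat = 0 by omega, pvGreedyLoop]
    have hb := PySem.Int.mod_neg_bounds t hneg
    unfold pvBlocks
    have h1 : (PySem.Int.mod t p).toNat = 0 := by omega
    have h2 : (p - PySem.Int.mod t p).toNat = 0 := by omega
    simp [h1, h2]
  · rw [greedy_eq_blocks p.toNat t p [] hpos rfl, List.nil_append]

-- ===== VERDICT (by name: the statement is the Claim_ definition above) =====
theorem divide_into_parts_spec : Claim_equal_divide_into_parts := by
  intro t p _ hp
  unfold Spec_divide_into_parts
  rw [A_eq_blocks t p hp, alt_eq_blocks t p hp]
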